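-- pv_equiv track=rewrite | github.com/The-Skyy-Rose-Collection-LLC/DevSkyy | scripts/dev/check_imports.py | check_common_issues
-- ===== SOURCE A (Python) =====
-- def check_common_issues(imports: list[str]) -> list[str]:
--     """Check for common import issues"""
--     issues = []
--
--     # Check for potential import shadowing
--     import_names = []
--     for imp in imports:
--         if " as " in imp:
--             name = imp.split(" as ")[1].strip()
--         elif "import " in imp:
--             name = imp.split("import ")[1].split(",")[0].strip()
--         else:
--             continue
--
--         if name in import_names:
--             issues.append(f"Potential duplicate import: {name}")
--         import_names.append(name)
--
--     return issues
-- ===== SOURCE B (Python) =====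
-- def check_common_issues(imports: list[str]) -> list[str]:
--     """Check for common import issues"""
--     names = []
--     for imp in imports:
--         if " as " in imp:
--             names.append(imp.split(" as ")[1].strip())
--         elif "import " in imp:
--             names.append(imp.split("import ")[1].split(",")[0].strip())
--     first = {}
--     for i, name in enumerate(names):
--         first.setdefault(name, i)
--     return [f"Potential duplicate import: {name}"
--             for i, name in enumerate(names) if first[name] != i]
-- ===== Notes on version B (the rewrite author's own statement) =====
-- stated objective: alternative
-- what changed: Replaces A's fused loop with a growing seen-list (membership scan per name) by a three-phase algorithm: extract all names, build a dict mapping each name to its first-occurrence index via setdefault, then emit a duplicate message for every occurrence whose position differs from its name's first index.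
import Mathlib
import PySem

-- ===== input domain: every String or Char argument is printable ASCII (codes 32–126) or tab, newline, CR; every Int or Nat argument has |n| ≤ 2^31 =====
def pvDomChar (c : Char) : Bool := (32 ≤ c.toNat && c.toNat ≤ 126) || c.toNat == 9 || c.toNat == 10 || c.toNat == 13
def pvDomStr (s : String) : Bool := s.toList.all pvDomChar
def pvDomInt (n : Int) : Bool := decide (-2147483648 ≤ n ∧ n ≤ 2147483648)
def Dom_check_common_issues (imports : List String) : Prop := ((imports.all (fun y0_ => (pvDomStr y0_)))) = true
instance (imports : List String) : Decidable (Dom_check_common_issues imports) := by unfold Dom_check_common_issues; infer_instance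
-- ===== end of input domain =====

-- B re-characterizes duplicates via a first-occurrence-index dict: extract names, map each name to its first index, emit a message for every occurrence at a later index (objective: alternative decomposition).


-- ===== PORT A =====
-- the two name-extraction expressions (`imp.split(" as ")[1].strip()` and
-- `imp.split("import ")[1].split(",")[0].strip()`); the indexed elements always exist
-- when the guarding `in` test holds, so the total pyGetD is exact there
def pvNameAs (imp : String) : String :=
  PySem.Str.strip (PySem.List.pyGetD ((PySem.Str.split? imp " as ").getD []) 1 "")
def pvNameImport (imp : String) : String :=
  PySem.Str.strip (PySem.List.pyGetD
    ((PySem.Str.split? (PySem.List.pyGetD ((PySem.Str.split? imp "import ").getD []) 1 "") ",").getD []) 0 "")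

-- A's loop body, carrying (issues, import_names)
def pvStepA (st : List String × List String) (imp : String) : List String × List String :=
  if PySem.Str.isIn " as " imp then
    let name := pvNameAs imp
    ((if name ∈ st.2 then st.1 ++ ["Potential duplicate import: " ++ name] else st.1), st.2 ++ [name])
  else if PySem.Str.isIn "import " imp then
    let name := pvNameImport imp
    ((if name ∈ st.2 then st.1 ++ ["Potential duplicate import: " ++ name] else st.1), st.2 ++ [name])
  else st

def check_common_issues (imports : List String) : List String :=
  (imports.foldl pvStepA ([], [])).1

-- ===== PORT B =====
-- phase 1: the extraction loop building `names` by append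
def pvNamesB (imports : List String) : List String :=
  imports.foldl (fun ns imp =>
    if PySem.Str.isIn " as " imp then ns ++ [pvNameAs imp]
    else if PySem.Str.isIn "import " imp then ns ++ [pvNameImport imp]
    else ns) []

-- phase 2: `first`, mapping each name to its first-occurrence index (setdefault loop)
def pvFirst (names : List String) : PySem.Dict String Int :=
  (PySem.List.enumerate names).foldl (fun d p => d.setdefault p.2 p.1) PySem.Dict.empty

-- phase 3: the comprehension `first[name] != i`
def check_common_issues_alt (imports : List String) : List String :=
  let names := pvNamesB imports
  let first := pvFirst names
  (PySem.List.enumerate names).filterMap (fun p =>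
    if first.get? p.2 ≠ some p.1 then some ("Potential duplicate import: " ++ p.2) else none)

-- ===== PRECONDITION & SPEC =====
def Spec_check_common_issues (imports : List String) (out : List String) : Prop := out = check_common_issues_alt imports
instance (imports : List String) (out : List String) : Decidable (Spec_check_common_issues imports out) := by unfold Spec_check_common_issues; infer_instance

-- ===== CLAIM =====
def Claim_equal_check_common_issues : Prop := ∀ (imports : List String), Dom_check_common_issues imports → Spec_check_common_issues imports (check_common_issues imports)

-- ===== LEMMAS AND PROOFS =====

-- proof-side name extraction (not used by either port's definition)
def pvExtract (imp : String) : Option String :=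
  if PySem.Str.isIn " as " imp then some (pvNameAs imp)
  else if PySem.Str.isIn "import " imp then some (pvNameImport imp)
  else none

-- canonical duplicate-message list, recursing on the names with the seen prefix
def pvDup (seen : List String) : List String → List String
  | [] => []
  | n :: rest => (if n ∈ seen then ["Potential duplicate import: " ++ n] else []) ++ pvDup (seen ++ [n]) rest

theorem pvStepA_some (st : List String × List String) (imp nm : String)
    (hext : pvExtract imp = some nm) :
    pvStepA st imp =
      ((if nm ∈ st.2 then st.1 ++ ["Potential duplicate import: " ++ nm] else st.1), st.2 ++ [nm]) := by
  unfold pvExtract at hext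
  unfold pvStepA
  split_ifs at hext ⊢ with h1 h2 <;> simp_all

theorem pvStepA_none (st : List String × List String) (imp : String)
    (hext : pvExtract imp = none) : pvStepA st imp = st := by
  unfold pvExtract at hext
  unfold pvStepA
  split_ifs at hext ⊢; simp_all

-- A's fold computes issues ++ pvDup over the extracted names
theorem pvA_fold (imports : List String) (issues seen : List String) :
    (imports.foldl pvStepA (issues, seen)).1
      = issues ++ pvDup seen (imports.filterMap pvExtract) := by
  induction imports generalizing issues seen with
  | nil => simp [pvDup]
  | cons imp rest ih =>
    rw [List.foldl_cons, List.filterMap_cons]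
    cases hext : pvExtract imp with
    | none => rw [pvStepA_none _ _ hext]; exact ih issues seen
    | some nm =>
      rw [pvStepA_some _ _ _ hext, pvDup]
      by_cases h : nm ∈ seen <;> simp [h, ih]

-- B's extraction loop builds the same names
theorem pvNamesB_eq (imports : List String) :
    pvNamesB imports = imports.filterMap pvExtract := by
  unfold pvNamesB
  suffices h : ∀ acc, imports.foldl (fun ns imp =>
      if PySem.Str.isIn " as " imp then ns ++ [pvNameAs imp]
      else if PySem.Str.isIn "import " imp then ns ++ [pvNameImport imp]
      else ns) acc = acc ++ imports.filterMap pvExtract by simpa using h []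
  induction imports with
  | nil => simp
  | cons imp rest ih =>
    intro acc
    rw [List.foldl_cons, List.filterMap_cons]
    by_cases h1 : PySem.Str.isIn " as " imp = true
    · rw [if_pos h1, show pvExtract imp = some (pvNameAs imp) by unfold pvExtract; rw [if_pos h1], ih]
      simp
    · by_cases h2 : PySem.Str.isIn "import " imp = true
      · rw [if_neg h1, if_pos h2,
          show pvExtract imp = some (pvNameImport imp) by unfold pvExtract; rw [if_neg h1, if_pos h2], ih]
        simp
      · rw [if_neg h1, if_neg h2,
          show pvExtract imp = none by unfold pvExtract; rw [if_neg h1, if_neg h2], ih]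

-- the setdefault fold characterized by the first occurrence (index?)
theorem pvFirst_aux (names : List String) : ∀ (s : Int) (d : PySem.Dict String Int) (n : String),
    ((PySem.List.enumerate names s).foldl (fun d p => d.setdefault p.2 p.1) d).get? n
      = ((d.get? n).orElse (fun _ => (PySem.List.index? names n).map (fun k => s + (k : Int)))) := by
  induction names with
  | nil =>
    intro s d n
    rw [PySem.List.enumerate_nil]
    cases hd : d.get? n <;>
      simp [hd, Option.orElse, PySem.List.index?_eq_idxOf?]
  | cons x rest ih =>
    intro s d n
    rw [PySem.List.enumerate_cons, List.foldl_cons, ih]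
    by_cases hx : n = x
    · subst hx
      rw [show ((s, n) : Int × String).2 = n from rfl, show ((s, n) : Int × String).1 = s from rfl,
        PySem.Dict.get?_setdefault_self, PySem.List.index?_cons_self]
      cases d.get? n <;> simp [Option.orElse]
    · rw [show ((s, x) : Int × String).2 = x from rfl,
        PySem.Dict.get?_setdefault_of_ne d _ hx, PySem.List.index?_cons_of_ne rest (fun h => hx h.symm)]
      cases d.get? n
      · cases PySem.List.index? rest n <;> simp [Option.orElse]
        omega
      · simp [Option.orElse]

theorem pvFirst_get (names : List String) (n : String) :
    (pvFirst names).get? n = (PySem.List.index? names n).map (fun k => (k : Int)) := by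
  unfold pvFirst
  rw [pvFirst_aux names 0 PySem.Dict.empty n]
  simp [Option.orElse]

-- B's comprehension over the enumerate, generalized over the already-processed prefix
theorem pvB_phase3 (names : List String) : ∀ (pre : List String),
    (PySem.List.enumerate names (pre.length : Int)).filterMap (fun p =>
        if (pvFirst (pre ++ names)).get? p.2 ≠ some p.1 then some ("Potential duplicate import: " ++ p.2) else none)
      = pvDup pre names := by
  induction names with
  | nil => intro pre; rw [PySem.List.enumerate_nil]; rfl
  | cons n rest ih =>
    intro pre
    rw [PySem.List.enumerate_cons, List.filterMap_cons, pvDup]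
    have hcond : ((pvFirst (pre ++ n :: rest)).get? n ≠ some (pre.length : Int)) ↔ n ∈ pre := by
      rw [pvFirst_get]
      by_cases hmem : n ∈ pre
      · rcases Option.isSome_iff_exists.mp ((PySem.List.index?_isSome_iff pre n).mpr hmem) with ⟨j, hj⟩
        have hja := PySem.List.getElem_of_index?_eq_some hj
        have hjlt : j < pre.length := hja.1
        rw [PySem.List.index?_append_of_mem _ hmem, hj]
        have hne : (j : Int) ≠ (pre.length : Int) := by
          intro h; omega
        simp [hmem, hne]
      · have : PySem.List.index? (pre ++ n :: rest) n = some pre.length := by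
          rw [PySem.List.index?_eq_some_iff]
          exact ⟨pre, rest, rfl, rfl, hmem⟩
        rw [this]; simp [hmem]
    have hrec := ih (pre ++ [n])
    have hlen : (((pre ++ [n]).length : Nat) : Int) = (pre.length : Int) + 1 := by
      simp
    rw [hlen, List.append_assoc, List.singleton_append] at hrec
    by_cases h : n ∈ pre
    · rw [if_pos (hcond.mpr h), if_pos h, hrec]
      rfl
    · rw [if_neg (fun hc => h (hcond.mp hc)), if_neg h, hrec]
      rfl

-- ===== VERDICT =====
theorem check_common_issues_spec : Claim_equal_check_common_issues := by
  intro imports _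
  unfold Spec_check_common_issues check_common_issues check_common_issues_alt
  rw [pvA_fold imports [] [], pvNamesB_eq]
  have h3 := pvB_phase3 (imports.filterMap pvExtract) []
  simp only [List.length_nil, Nat.cast_zero, List.nil_append] at h3
  rw [List.nil_append]
  exact h3.symm
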